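-- pv_equiv track=rewrite | github.com/LocusLontrime/Python | LeetCodeRush/Hard/668. Kth Smallest Number in Multiplication Table/668. Kth Smallest Number in Multiplication Table.py | find_nums_no_larger_than_mi
-- ===== SOURCE A (Python) =====
-- def find_nums_no_larger_than_mi(m: int, n: int, mi: int):
--     nums_no_larger_than_mi = n * (q := mi // n)
--     delta = 0
--     for i in range(m, q, -1):
--         while (delta + 1) * i <= mi:
--             delta += 1
--         nums_no_larger_than_mi += delta
--     return nums_no_larger_than_mi
-- ===== SOURCE B (Python) =====
-- def find_nums_no_larger_than_mi(m: int, n: int, mi: int):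
--     # Divisor-block summation: group indices i with equal quotient mi // i.
--     q = mi // n
--     total = n * q
--     i = max(q, 0) + 1
--     while i <= m:
--         v = mi // i
--         if v == 0:
--             break
--         j = mi // v
--         total += v * (min(m, j) - i + 1)
--         i = max(j, i) + 1
--     return total
-- ===== Notes on version B (the rewrite author's own statement) =====
-- stated objective: faster
-- what changed: Replaces A's per-index loop with carried delta (O(m) with an inner counting while) by divisor-block summation that groups all indices sharing the same quotient mi//i, so the loop runs O(sqrt(mi)) times.
-- outside the precondition, e.g. on find_nums_no_larger_than_mi(9, -3, -7): A returns -6, B returns 0; on find_nums_no_larger_than_mi(2, 3, -1): A returns -3, B returns -4; on find_nums_no_larger_than_mi(2, -3, 5): A does not finish within the time limit, B returns 13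
import Mathlib
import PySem

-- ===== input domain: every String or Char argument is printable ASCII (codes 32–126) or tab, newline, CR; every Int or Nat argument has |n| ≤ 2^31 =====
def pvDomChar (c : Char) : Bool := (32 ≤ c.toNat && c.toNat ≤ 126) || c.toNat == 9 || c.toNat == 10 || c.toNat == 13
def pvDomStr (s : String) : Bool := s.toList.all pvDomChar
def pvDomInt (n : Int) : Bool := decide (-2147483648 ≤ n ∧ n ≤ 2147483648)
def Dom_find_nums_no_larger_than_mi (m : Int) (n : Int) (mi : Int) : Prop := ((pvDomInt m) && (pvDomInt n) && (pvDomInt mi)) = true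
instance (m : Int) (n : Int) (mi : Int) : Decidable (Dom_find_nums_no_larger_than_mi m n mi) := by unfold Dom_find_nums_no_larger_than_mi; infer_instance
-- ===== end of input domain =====

-- B replaces A's backwards per-index scan (carried delta, inner counting while) by
-- divisor-block summation grouping equal quotients mi // i; measured faster (asymptotic: O(m) -> O(sqrt(mi))).


-- ===== PORT A =====
-- inner 'while (delta + 1) * i <= mi: delta += 1', run with fuel mi.toNat + 1;
-- on Pre_ inputs every loop index i is ≥ 1 and the carried delta stays in [0, mi//i],
-- so the fuel always exceeds the number of iterations and the port is exact there.
def pvWhileDelta (mi i : Int) : Nat → Int → Int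
  | 0, d => d
  | fuel + 1, d => if (d + 1) * i ≤ mi then pvWhileDelta mi i fuel (d + 1) else d

-- one iteration of A's for-loop: state = (delta, nums_no_larger_than_mi)
def pvStepA (mi : Int) (st : Int × Int) (i : Int) : Int × Int :=
  let d := pvWhileDelta mi i (mi.toNat + 1) st.1
  (d, st.2 + d)

-- A: nums = n * (q := mi // n); for i in range(m, q, -1): while …: delta += 1; nums += delta
def find_nums_no_larger_than_mi (m : Int) (n : Int) (mi : Int) : Int :=
  ((PySem.List.pyRange m (PySem.Int.floordiv mi n) (-1)).foldl (pvStepA mi)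
    (0, n * PySem.Int.floordiv mi n)).2

-- ===== PORT B =====
-- B's while-loop: i jumps past each block of equal quotients v = mi // i
def pvBlocks (m mi i total : Int) : Int :=
  if i ≤ m then
    if PySem.Int.floordiv mi i = 0 then total
    else
      pvBlocks m mi (max (PySem.Int.floordiv mi (PySem.Int.floordiv mi i)) i + 1)
        (total + PySem.Int.floordiv mi i *
          (min m (PySem.Int.floordiv mi (PySem.Int.floordiv mi i)) - i + 1))
  else total
termination_by (m + 1 - i).toNat
decreasing_by omega

def find_nums_no_larger_than_mi_alt (m : Int) (n : Int) (mi : Int) : Int :=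
  pvBlocks m mi (max (PySem.Int.floordiv mi n) 0 + 1) (n * PySem.Int.floordiv mi n)

-- ===== PRECONDITION & SPEC =====
-- Pre_ restricts to the natural domain of the task (table height n ≥ 1 and nonnegative
-- threshold mi), plus the trivial empty-loop case m ≤ mi // n for any n ≠ 0; outside it A
-- raises ZeroDivisionError (n = 0), loops forever (the scan reaches index 0 with mi ≥ 0),
-- or returns values shaped by delta carrying over through a backwards scan that also visits
-- nonpositive indices, an artefact the direct count B does not reproduce.
def Pre_find_nums_no_larger_than_mi (m : Int) (n : Int) (mi : Int) : Prop :=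
  (1 ≤ n ∧ 0 ≤ mi) ∨ (n ≠ 0 ∧ m ≤ PySem.Int.floordiv mi n)
instance (m : Int) (n : Int) (mi : Int) : Decidable (Pre_find_nums_no_larger_than_mi m n mi) := by
  unfold Pre_find_nums_no_larger_than_mi; infer_instance

def pvWitness_find_nums_no_larger_than_mi : Int × Int × Int := (5, 3, 7)

def Spec_find_nums_no_larger_than_mi (m : Int) (n : Int) (mi : Int) (out : Int) : Prop :=
  out = find_nums_no_larger_than_mi_alt m n mi
instance (m : Int) (n : Int) (mi : Int) (out : Int) : Decidable (Spec_find_nums_no_larger_than_mi m n mi out) := by unfold Spec_find_nums_no_larger_than_mi; infer_instance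

-- ===== CLAIM (what is proved, stated in full; the proofs are below) =====
def Claim_equal_find_nums_no_larger_than_mi : Prop := ∀ (m : Int) (n : Int) (mi : Int), Dom_find_nums_no_larger_than_mi m n mi → Pre_find_nums_no_larger_than_mi m n mi → Spec_find_nums_no_larger_than_mi m n mi (find_nums_no_larger_than_mi m n mi)

-- ===== LEMMAS AND PROOFS =====

-- floor division by a positive divisor is antitone in the divisor (for 0 ≤ mi)
lemma pv_ediv_anti (mi a b : Int) (h : 0 ≤ mi) (ha : 0 < a) (hab : a ≤ b) :
    mi / b ≤ mi / a := by
  rw [Int.le_ediv_iff_mul_le ha]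
  calc mi / b * a ≤ mi / b * b :=
        mul_le_mul_of_nonneg_left hab (Int.ediv_nonneg h (by omega))
    _ ≤ mi := Int.ediv_mul_le mi (by omega)

lemma pv_sum_split (f : Int → Int) (a b c : Int) (h1 : a ≤ b) (h2 : b ≤ c) :
    ∑ k ∈ Finset.Ioc a c, f k = ∑ k ∈ Finset.Ioc a b, f k + ∑ k ∈ Finset.Ioc b c, f k := by
  rw [← Finset.Ioc_union_Ioc_eq_Ioc h1 h2,
      Finset.sum_union (Finset.Ioc_disjoint_Ioc_of_le le_rfl)]

lemma pv_sum_last (f : Int → Int) (m : Int) : ∑ k ∈ Finset.Ioc (m - 1) m, f k = f m := by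
  have h : Finset.Ioc (m - 1) m = {m} := by ext x; simp [Finset.mem_Ioc]; omega
  rw [h, Finset.sum_singleton]

-- A's inner while loop computes max d (mi / i) once the fuel covers the iteration count
lemma pv_while_eq (mi i : Int) (hi : 0 < i) :
    ∀ (fuel : Nat) (d : Int), (mi / i - d).toNat ≤ fuel →
      pvWhileDelta mi i fuel d = max d (mi / i) := by
  intro fuel
  induction fuel with
  | zero =>
    intro d hd
    rw [pvWhileDelta]
    omega
  | succ f ih =>
    intro d hd
    rw [pvWhileDelta]
    by_cases hc : (d + 1) * i ≤ mi
    · rw [if_pos hc]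
      have hlt : d + 1 ≤ mi / i := (Int.le_ediv_iff_mul_le hi).mpr hc
      rw [ih (d + 1) (by omega)]
      omega
    · rw [if_neg hc]
      have hle : mi / i < d + 1 := (Int.ediv_lt_iff_lt_mul hi).mpr (by omega)
      omega

-- A's fold over range(m, q, -1) accumulates ∑_{k=q+1}^{m} mi / k
lemma pv_foldA (mi : Int) (hmi : 0 ≤ mi) :
    ∀ (c : Nat) (m q : Int) (st : Int × Int), (m - q).toNat = c → 0 ≤ q →
      (q < m → 0 ≤ st.1 ∧ st.1 ≤ mi / m) →
      ((PySem.List.pyRange m q (-1)).foldl (pvStepA mi) st).2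
        = st.2 + ∑ k ∈ Finset.Ioc q m, mi / k := by
  intro c
  induction c with
  | zero =>
    intro m q st hc _ _
    rw [PySem.List.pyRange_neg_one_eq_nil (by omega), List.foldl_nil,
        Finset.Ioc_eq_empty (by omega), Finset.sum_empty]
    omega
  | succ c ih =>
    intro m q st hc hq hcarry
    have hqm : q < m := by omega
    obtain ⟨hd0, hdm⟩ := hcarry hqm
    have hm1 : 1 ≤ m := by omega
    have hfuel : (mi / m - st.1).toNat ≤ mi.toNat + 1 := by
      have h1 : mi / m ≤ mi := Int.ediv_le_self _ hmi
      omega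
    have hdelta : pvWhileDelta mi m (mi.toNat + 1) st.1 = mi / m := by
      rw [pv_while_eq mi m (by omega) _ _ hfuel]; omega
    rw [PySem.List.pyRange_neg_one_cons hqm, List.foldl_cons]
    have hstep : pvStepA mi st m = (mi / m, st.2 + mi / m) := by
      simp only [pvStepA, hdelta]
    rw [hstep,
        ih (m - 1) q (mi / m, st.2 + mi / m) (by omega) hq ?_]
    · rw [pv_sum_split (fun k => mi / k) q (m - 1) m (by omega) (by omega), pv_sum_last]
      simp only
      ring
    · intro hq1
      refine ⟨Int.ediv_nonneg hmi (by omega), pv_ediv_anti mi (m - 1) m hmi (by omega) (by omega)⟩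

-- B's block loop from index i adds ∑_{k=i}^{m} mi / k
lemma pv_blocks_eq (m mi : Int) (hmi : 0 ≤ mi) :
    ∀ (c : Nat) (i total : Int), (m + 1 - i).toNat = c → 1 ≤ i →
      pvBlocks m mi i total = total + ∑ k ∈ Finset.Ioc (i - 1) m, mi / k := by
  intro c
  induction c using Nat.strong_induction_on with
  | _ c ih =>
    intro i total hc hi
    rw [pvBlocks]
    by_cases him : i ≤ m
    · rw [if_pos him]
      have hfd : PySem.Int.floordiv mi i = mi / i :=
        PySem.Int.floordiv_eq_ediv_of_pos (by omega)
      by_cases hv : PySem.Int.floordiv mi i = 0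
      · rw [if_pos hv]
        have hmi_lt : mi < i := by
          by_contra hge
          have : 1 ≤ mi / i := (Int.le_ediv_iff_mul_le (by omega)).mpr (by omega)
          omega
        have : ∑ k ∈ Finset.Ioc (i - 1) m, mi / k = 0 :=
          Finset.sum_eq_zero (fun k hk => by
            rw [Finset.mem_Ioc] at hk
            exact Int.ediv_eq_zero_of_lt hmi (by omega))
        omega
      · rw [if_neg hv]
        have hv1 : 1 ≤ mi / i := by
          have := Int.ediv_nonneg hmi (by omega : (0:Int) ≤ i)
          omega
        have hfj : PySem.Int.floordiv mi (mi / i) = mi / (mi / i) :=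
          PySem.Int.floordiv_eq_ediv_of_pos (by omega)
        have hij : i ≤ mi / (mi / i) := by
          rw [Int.le_ediv_iff_mul_le (by omega)]
          calc i * (mi / i) = mi / i * i := mul_comm _ _
            _ ≤ mi := Int.ediv_mul_le mi (by omega)
        have hval : ∀ k, i ≤ k → k ≤ mi / (mi / i) → mi / k = mi / i := by
          intro k hik hkj
          refine le_antisymm (pv_ediv_anti mi i k hmi (by omega) hik) ?_
          rw [Int.le_ediv_iff_mul_le (by omega : (0:Int) < k)]
          calc mi / i * k = k * (mi / i) := mul_comm _ _
            _ ≤ mi := (Int.le_ediv_iff_mul_le (by omega)).mp hkj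
        rw [hfd, hfj]
        have hmax : max (mi / (mi / i)) i = mi / (mi / i) := max_eq_left hij
        rw [hmax]
        rw [ih (m + 1 - (mi / (mi / i) + 1)).toNat (by omega)
            (mi / (mi / i) + 1) _ rfl (by omega)]
        have hsub : mi / (mi / i) + 1 - 1 = mi / (mi / i) := by omega
        rw [hsub]
        by_cases hjm : mi / (mi / i) ≤ m
        · have hmin : min m (mi / (mi / i)) = mi / (mi / i) := min_eq_right hjm
          rw [hmin,
              pv_sum_split (fun k => mi / k) (i - 1) (mi / (mi / i)) m (by omega) hjm]
          have hconst : ∑ k ∈ Finset.Ioc (i - 1) (mi / (mi / i)), mi / k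
              = ∑ _k ∈ Finset.Ioc (i - 1) (mi / (mi / i)), mi / i :=
            Finset.sum_congr rfl (fun k hk => by
              rw [Finset.mem_Ioc] at hk
              exact hval k (by omega) hk.2)
          rw [hconst, Finset.sum_const, Int.card_Ioc, nsmul_eq_mul]
          have hcast : ((mi / (mi / i) - (i - 1)).toNat : Int) = mi / (mi / i) - i + 1 := by
            omega
          rw [hcast]
          ring
        · have hmin : min m (mi / (mi / i)) = m := min_eq_left (by omega)
          rw [hmin, Finset.Ioc_eq_empty (by omega : ¬ mi / (mi / i) < m), Finset.sum_empty]
          have hconst : ∑ k ∈ Finset.Ioc (i - 1) m, mi / k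
              = ∑ _k ∈ Finset.Ioc (i - 1) m, mi / i :=
            Finset.sum_congr rfl (fun k hk => by
              rw [Finset.mem_Ioc] at hk
              exact hval k (by omega) (by omega))
          rw [hconst, Finset.sum_const, Int.card_Ioc, nsmul_eq_mul]
          have hcast : ((m - (i - 1)).toNat : Int) = m - i + 1 := by omega
          rw [hcast]
          ring
    · rw [if_neg him]
      rw [Finset.Ioc_eq_empty (by omega : ¬ i - 1 < m), Finset.sum_empty]
      omega

-- ===== VERDICT (by name: the statement is the Claim_ definition above) =====
theorem find_nums_no_larger_than_mi_spec : Claim_equal_find_nums_no_larger_than_mi := by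
  intro m n mi _ hpre
  show find_nums_no_larger_than_mi m n mi = find_nums_no_larger_than_mi_alt m n mi
  unfold find_nums_no_larger_than_mi find_nums_no_larger_than_mi_alt
  by_cases hmq : m ≤ PySem.Int.floordiv mi n
  · rw [PySem.List.pyRange_neg_one_eq_nil hmq, List.foldl_nil,
        pvBlocks, if_neg (by omega : ¬ max (PySem.Int.floordiv mi n) 0 + 1 ≤ m)]
  · obtain ⟨hn, hmi⟩ := hpre.resolve_right (fun h => hmq h.2)
    have hfd : PySem.Int.floordiv mi n = mi / n :=
      PySem.Int.floordiv_eq_ediv_of_pos (by omega)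
    have hq0 : 0 ≤ PySem.Int.floordiv mi n := by
      rw [hfd]; exact Int.ediv_nonneg hmi (by omega)
    have hmax : max (PySem.Int.floordiv mi n) 0 = PySem.Int.floordiv mi n :=
      max_eq_left hq0
    rw [pv_foldA mi hmi (m - PySem.Int.floordiv mi n).toNat m _ _ rfl hq0 ?_,
        hmax,
        pv_blocks_eq m mi hmi (m + 1 - (PySem.Int.floordiv mi n + 1)).toNat
          (PySem.Int.floordiv mi n + 1) _ rfl (by omega)]
    · have hsub : PySem.Int.floordiv mi n + 1 - 1 = PySem.Int.floordiv mi n := by omega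
      rw [hsub]
    · intro hqm
      exact ⟨le_rfl, Int.ediv_nonneg hmi (by omega)⟩
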